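-- pv_equiv track=rewrite | github.com/BeastRO1377/TradingBot | MultiuserBot_v23_Refactored_MLXonly_CLEAN6.py | _aggregate_series_5m
-- ===== SOURCE A (Python) =====
-- def _aggregate_series_5m(series: list, method: str = "sum") -> list:
--     """
--     Aggregate a numeric 1‑minute series into 5‑minute buckets.
--     method='sum' → sum values inside the bucket
--     method='last' → take the last value in the bucket
--     """
--     if not series:
--         return []
--     result = []
--     full_blocks = len(series) // 5
--     for i in range(full_blocks):
--         chunk = series[i * 5:(i + 1) * 5]
--         if method == "sum":
--             result.append(sum(chunk))
--         else:
--             result.append(chunk[-1])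
--     return result
-- ===== SOURCE B (Python) =====
-- def _aggregate_series_5m(series: list, method: str = "sum") -> list:
--     """Single streaming pass: keep a running accumulator and a modular
--     position counter; emit and reset every time a 5th element arrives.
--     Never materialises chunks; the trailing partial bucket is simply
--     never emitted."""
--     result = []
--     acc = 0
--     for pos, v in enumerate(series):
--         acc = acc + v if method == "sum" else v
--         if pos % 5 == 4:
--             result.append(acc)
--             acc = 0
--     return result
-- ===== Notes on version B (the rewrite author's own statement) =====
-- stated objective: alternative
-- what changed: Replaces chunk-count computation plus per-block slicing with a single streaming pass that keeps a running accumulator and a modular position counter, emitting and resetting every fifth element; no chunks are ever materialised.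
import Mathlib
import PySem

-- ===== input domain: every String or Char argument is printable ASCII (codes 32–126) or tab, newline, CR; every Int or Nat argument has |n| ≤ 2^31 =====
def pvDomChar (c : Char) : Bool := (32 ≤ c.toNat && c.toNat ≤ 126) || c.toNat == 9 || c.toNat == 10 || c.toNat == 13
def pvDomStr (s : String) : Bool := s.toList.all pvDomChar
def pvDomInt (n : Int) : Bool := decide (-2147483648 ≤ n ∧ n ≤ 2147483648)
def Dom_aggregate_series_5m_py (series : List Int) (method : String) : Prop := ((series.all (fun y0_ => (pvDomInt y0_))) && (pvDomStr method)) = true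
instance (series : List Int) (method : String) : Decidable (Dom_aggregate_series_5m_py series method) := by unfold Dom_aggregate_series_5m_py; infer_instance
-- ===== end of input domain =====

-- B replaces block-count + slicing by one streaming pass with a running accumulator and a mod-5 position counter.


-- ===== PORT A =====
-- literal transliteration: guard for empty, full_blocks = len // 5, loop over range appending
-- sum(chunk) or chunk[-1]; chunk always has 5 elements so chunk[-1] never raises (.getD 0 is unreachable).
def aggregate_series_5m_py (series : List Int) (method : String) : List Int :=
  if series = [] then []
  else
    let full_blocks := PySem.Int.floordiv (series.length : Int) 5
    (PySem.List.pyRange 0 full_blocks 1).foldl (fun result i =>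
      let chunk := PySem.List.slice series (some (i * 5)) (some ((i + 1) * 5))
      if method == "sum" then result ++ [chunk.sum]
      else result ++ [(PySem.List.pyGet? chunk (-1)).getD 0]) []

-- ===== PORT B =====
-- transliteration of Source B: fold over enumerate(series) with state (result, acc);
-- acc = acc + v if method == "sum" else v; emit and reset when pos % 5 == 4.
def aggregate_series_5m_py_alt (series : List Int) (method : String) : List Int :=
  ((PySem.List.enumerate series).foldl (fun (st : List Int × Int) p =>
      let acc := if method == "sum" then st.2 + p.2 else p.2
      if PySem.Int.mod p.1 5 == 4 then (st.1 ++ [acc], 0) else (st.1, acc))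
    ([], 0)).1

-- ===== PRECONDITION & SPEC =====
def Spec_aggregate_series_5m_py (series : List Int) (method : String) (out : List Int) : Prop := out = aggregate_series_5m_py_alt series method
instance (series : List Int) (method : String) (out : List Int) : Decidable (Spec_aggregate_series_5m_py series method out) := by unfold Spec_aggregate_series_5m_py; infer_instance

-- ===== CLAIM (what is proved, stated in full; the proofs are below) =====
def Claim_equal_aggregate_series_5m_py : Prop := ∀ (series : List Int) (method : String), Dom_aggregate_series_5m_py series method → Spec_aggregate_series_5m_py series method (aggregate_series_5m_py series method)

-- ===== LEMMAS AND PROOFS =====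

-- A's i-th bucket, at a Nat index
def bucket (series : List Int) (method : String) (k : Nat) : Int :=
  let chunk := (series.drop (5 * k)).take 5
  if method == "sum" then chunk.sum else (PySem.List.pyGet? chunk (-1)).getD 0

lemma slice_bucket (series : List Int) (k : Nat) :
    PySem.List.slice series (some ((k : Int) * 5)) (some (((k : Int) + 1) * 5))
      = (series.drop (5 * k)).take 5 := by
  have h1 : ((k : Int) * 5) = ((5 * k : Nat) : Int) := by push_cast; ring
  have h2 : (((k : Int) + 1) * 5) = ((5 * k : Nat) : Int) + ((5 : Nat) : Int) := by push_cast; ring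
  rw [h1, h2, PySem.List.slice_natCast_add]

-- A unfolded to a map over Nat indices
lemma a_eq_map (series : List Int) (method : String) :
    aggregate_series_5m_py series method
      = (List.range (series.length / 5)).map (bucket series method) := by
  unfold aggregate_series_5m_py
  by_cases hnil : series = []
  · simp [hnil]
  · simp only [if_neg hnil]
    have hfd : PySem.Int.floordiv (series.length : Int) 5
        = ((series.length / 5 : Nat) : Int) := by
      exact_mod_cast PySem.Int.floordiv_natCast series.length 5
    rw [hfd, PySem.List.pyRange_zero_natCast]
    cases hm : (method == "sum") with
    | true =>
        simp only [if_true, PySem.List.foldl_append_singleton_eq_map, List.map_map,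
          List.nil_append]
        refine List.map_congr_left (fun k _ => ?_)
        simp only [Function.comp, slice_bucket, bucket, hm, if_true]
    | false =>
        simp only [Bool.false_eq_true, if_false, PySem.List.foldl_append_singleton_eq_map,
          List.map_map, List.nil_append]
        refine List.map_congr_left (fun k _ => ?_)
        simp only [Function.comp, slice_bucket, bucket, hm, Bool.false_eq_true, if_false]

-- reference recursion (proof-only): B's stream written as a recursion on (position-in-bucket, acc)
def specGo (method : String) : Nat → Int → List Int → List Int
  | _, _, [] => []
  | j, acc, v :: rest =>
      let acc' := if method == "sum" then acc + v else v
      if j = 4 then acc' :: specGo method 0 0 rest else specGo method (j + 1) acc' rest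

-- invariant of B's fold: starting at absolute position n with partial state (res, acc)
lemma fold_eq_specGo (method : String) (l : List Int) :
    ∀ (n : Nat) (res : List Int) (acc : Int),
    ((PySem.List.enumerate l (n : Int)).foldl (fun (st : List Int × Int) p =>
        let a := if method == "sum" then st.2 + p.2 else p.2
        if PySem.Int.mod p.1 5 == 4 then (st.1 ++ [a], 0) else (st.1, a))
      (res, acc)).1 = res ++ specGo method (n % 5) acc l := by
  induction l with
  | nil => intro n res acc; simp [PySem.List.enumerate_nil, specGo]
  | cons v rest ih =>
      intro n res acc
      rw [PySem.List.enumerate_cons, List.foldl_cons]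
      have hmod : PySem.Int.mod (n : Int) 5 = ((n % 5 : Nat) : Int) :=
        PySem.Int.mod_natCast n 5
      have hcast : ((n : Int) + 1) = ((n + 1 : Nat) : Int) := by push_cast; ring
      by_cases h4 : n % 5 = 4
      · have hb : (PySem.Int.mod (n : Int) 5 == 4) = true := by
          rw [hmod, h4]; rfl
        have hn1 : (n + 1) % 5 = 0 := by omega
        simp only [hb, if_true, hcast, ih, specGo, h4, if_true, hn1]
        simp
      · have hb : (PySem.Int.mod (n : Int) 5 == 4) = false := by
          rw [hmod]
          simp only [beq_eq_false_iff_ne, ne_eq]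
          exact_mod_cast h4
        have hlt : n % 5 < 4 := by omega
        have hn1 : (n + 1) % 5 = n % 5 + 1 := by omega
        simp only [hb, Bool.false_eq_true, if_false, hcast, ih, specGo, h4, hn1]

lemma alt_eq_specGo (series : List Int) (method : String) :
    aggregate_series_5m_py_alt series method = specGo method 0 0 series := by
  unfold aggregate_series_5m_py_alt
  have h := fold_eq_specGo method series 0 [] 0
  simpa using h

lemma bucket_succ (a b c d e : Int) (rest : List Int) (method : String) (k : Nat) :
    bucket (a :: b :: c :: d :: e :: rest) method (k + 1) = bucket rest method k := by
  simp only [bucket]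
  have : 5 * (k + 1) = (5 * k) + 5 := by ring
  simp [this, List.drop_succ_cons]

-- proof-only 5-at-a-time view used to connect the two characterisations
def altGo (method : String) : List Int → List Int
  | a :: b :: c :: d :: e :: rest =>
      (if method == "sum" then a + b + c + d + e else e) :: altGo method rest
  | _ => []

lemma specGo_eq_altGo (method : String) (l : List Int) :
    specGo method 0 0 l = altGo method l := by
  induction l using altGo.induct with
  | case1 a b c d e rest ih =>
      by_cases h : method = "sum"
      · subst h
        simp [specGo, altGo, ih]
      · simp [specGo, altGo, h, ih]
  | case2 l h =>
      match l, h with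
      | [], _ => simp [specGo, altGo]
      | [x1], _ => simp [specGo, altGo]
      | [x1, x2], _ => simp [specGo, altGo]
      | [x1, x2, x3], _ => simp [specGo, altGo]
      | [x1, x2, x3, x4], _ => simp [specGo, altGo]
      | x1 :: x2 :: x3 :: x4 :: x5 :: r, h => exact absurd rfl (h x1 x2 x3 x4 x5 r)

lemma map_bucket_eq_altGo (series : List Int) (method : String) :
    (List.range (series.length / 5)).map (bucket series method) = altGo method series := by
  induction series using altGo.induct with
  | case1 a b c d e rest ih =>
      have hlen : (a :: b :: c :: d :: e :: rest).length / 5 = rest.length / 5 + 1 := by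
        simp only [List.length_cons]; omega
      rw [hlen, List.range_succ_eq_map, List.map_cons, List.map_map, altGo]
      rw [show List.map (bucket (a :: b :: c :: d :: e :: rest) method ∘ Nat.succ)
            (List.range (rest.length / 5)) = altGo method rest from by
        rw [← ih]
        exact List.map_congr_left (fun k _ => bucket_succ a b c d e rest method k)]
      congr 1
      by_cases h5 : method = "sum" <;>
        simp [bucket, PySem.List.pyGet?, PySem.List.pyIdx?, h5]
      ring
  | case2 l h =>
      match l, h with
      | [], _ => simp [altGo]
      | [x1], _ => simp [altGo]
      | [x1, x2], _ => simp [altGo]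
      | [x1, x2, x3], _ => simp [altGo]
      | [x1, x2, x3, x4], _ => simp [altGo]
      | x1 :: x2 :: x3 :: x4 :: x5 :: r, h => exact absurd rfl (h x1 x2 x3 x4 x5 r)

-- ===== VERDICT (by name: the statement is the Claim_ definition above) =====
theorem aggregate_series_5m_py_spec : Claim_equal_aggregate_series_5m_py := by
  intro series method _
  unfold Spec_aggregate_series_5m_py
  rw [a_eq_map, map_bucket_eq_altGo, alt_eq_specGo, specGo_eq_altGo]
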